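-- pv_equiv track=rewrite | github.com/nathanvale/side-quest-marketplace | plugins/bookmarks/scripts/search.py | search_bookmarks
-- ===== SOURCE A (Python) =====
-- def search_bookmarks(
--     bookmarks: list[dict],
--     query: str,
--     folder: str | None = None,
--     limit: int = 20,
-- ) -> list[dict]:
--     """Search bookmarks by title and URL."""
--     query_lower = query.lower()
--     query_words = query_lower.split()
--
--     results = []
--     for bm in bookmarks:
--         # Filter by folder if specified
--         if folder and folder.lower() not in bm["folder"].lower():
--             continue
--
--         # Score based on matches
--         title_lower = bm["title"].lower()
--         url_lower = bm["url"].lower()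
--         searchable = f"{title_lower} {url_lower}"
--
--         # All query words must match somewhere
--         if not all(word in searchable for word in query_words):
--             continue
--
--         # Scoring: title matches worth more
--         score = 0
--         for word in query_words:
--             if word in title_lower:
--                 score += 2
--             if word in url_lower:
--                 score += 1
--
--         results.append((score, bm))
--
--     # Sort by score descending, then by title
--     results.sort(key=lambda x: (-x[0], x[1]["title"].lower()))
--     return [bm for _, bm in results[:limit]]
-- ===== SOURCE B (Python) =====
-- def search_bookmarks(
--     bookmarks: list[dict],
--     query: str,
--     folder: str | None = None,
--     limit: int = 20,
-- ) -> list[dict]: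
--     """Search bookmarks by title and URL.
--
--     One-pass top-k selection: instead of collecting every match and sorting the
--     whole list, keep a buffer of at most `limit` best entries, sorted by
--     (-score, title.lower(), arrival index); the index tie-break reproduces the
--     stable sort's ordering. Non-positive limits yield no results.
--     """
--     query_words = query.lower().split()
--     k = limit if limit > 0 else 0
--
--     top = []  # entries (key, bm), kept sorted ascending by key, len(top) <= k
--     idx = 0
--     for bm in bookmarks:
--         idx += 1
--         if folder and folder.lower() not in bm["folder"].lower():
--             continue
--         title_lower = bm["title"].lower()
--         url_lower = bm["url"].lower()
--         searchable = f"{title_lower} {url_lower}"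
--         if not all(word in searchable for word in query_words):
--             continue
--         score = 0
--         for word in query_words:
--             if word in title_lower:
--                 score += 2
--             if word in url_lower:
--                 score += 1
--         key = (-score, title_lower, idx)
--         if len(top) < k:
--             _insort(top, (key, bm))
--         elif top and key < top[-1][0]:
--             _insort(top, (key, bm))
--             top.pop()
--     return [bm for _, bm in top]
--
--
-- def _insort(top, entry):
--     """Insert entry into the ascending buffer, before the first larger key."""
--     for i in range(len(top)):
--         if entry[0] < top[i][0]:
--             top.insert(i, entry)
--             return
--     top.append(entry)
-- ===== Notes on version B (the rewrite author's own statement) =====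
-- stated objective: alternative
-- what changed: Instead of collecting all matches, sorting the whole list stably by (-score, lowercased title) and slicing, B selects the top-limit matches in a single pass with a bounded sorted insertion buffer keyed by (-score, lowercased title, arrival index), the index tie-break reproducing the stable sort's order.
import Mathlib
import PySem

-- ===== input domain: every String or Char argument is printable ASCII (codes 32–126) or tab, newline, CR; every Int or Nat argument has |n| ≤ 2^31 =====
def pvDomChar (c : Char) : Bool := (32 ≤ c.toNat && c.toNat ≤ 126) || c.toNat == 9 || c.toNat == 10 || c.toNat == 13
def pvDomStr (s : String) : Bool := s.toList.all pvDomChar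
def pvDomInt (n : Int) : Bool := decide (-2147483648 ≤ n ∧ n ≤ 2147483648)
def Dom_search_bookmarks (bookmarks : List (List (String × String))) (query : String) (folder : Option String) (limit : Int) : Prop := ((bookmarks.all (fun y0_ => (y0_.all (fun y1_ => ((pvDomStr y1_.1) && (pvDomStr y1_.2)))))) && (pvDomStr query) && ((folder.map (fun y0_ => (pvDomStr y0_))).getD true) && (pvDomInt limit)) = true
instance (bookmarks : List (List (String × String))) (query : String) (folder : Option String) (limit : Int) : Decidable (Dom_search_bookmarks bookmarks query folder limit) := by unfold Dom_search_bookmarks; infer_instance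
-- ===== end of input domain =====

-- B replaces A's collect-all / stable-sort / slice by a one-pass bounded insertion buffer of at
-- most `limit` entries keyed by (-score, lowercased title, arrival index) — an alternative top-k
-- strategy of similar cost (filtering and scoring are unchanged).

-- helpers shared by both ports (A and B filter and score bookmarks with identical code)
def sbGet (bm : List (String × String)) (k : String) : String :=
  (PySem.Dict.mk bm).getD k ""

-- `if folder and folder.lower() not in bm["folder"].lower(): continue`
def sbSkip (folder : Option String) (bm : List (String × String)) : Bool :=
  match folder with
  | none => false
  | some f => decide (f ≠ "") && !(PySem.Str.isIn (PySem.Str.lower f) (PySem.Str.lower (sbGet bm "folder")))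

def sbTitle (bm : List (String × String)) : String := PySem.Str.lower (sbGet bm "title")

def sbUrl (bm : List (String × String)) : String := PySem.Str.lower (sbGet bm "url")

-- `searchable = f"{title_lower} {url_lower}"` and the all-words gate
def sbMatches (words : List String) (bm : List (String × String)) : Bool :=
  words.all (fun w => PySem.Str.isIn w (PySem.Str.join " " [sbTitle bm, sbUrl bm]))

-- `score = 0; for word in query_words: …`
def sbScore (words : List String) (bm : List (String × String)) : Int :=
  words.foldl (fun s w =>
    let s1 := if PySem.Str.isIn w (sbTitle bm) then s + 2 else s
    if PySem.Str.isIn w (sbUrl bm) then s1 + 1 else s1) 0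

-- ===== PORT A =====
def search_bookmarks (bookmarks : List (List (String × String))) (query : String) (folder : Option String) (limit : Int) : List (List (String × String)) :=
  let query_lower := PySem.Str.lower query
  let query_words := PySem.Str.split₀ query_lower
  let results := bookmarks.foldl (fun acc bm =>
    if sbSkip folder bm then acc
    else if !(sbMatches query_words bm) then acc
    else acc ++ [(sbScore query_words bm, bm)]) ([] : List (Int × List (String × String)))
  let sortedResults := PySem.List.sorted2 results (fun x => -x.1) (fun x => sbTitle x.2)
  (PySem.List.slice sortedResults none (some limit)).map (fun x => x.2)

-- ===== PORT B =====
-- Python tuple `<` on (-score, title_lower, idx)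
def sbKeyLt (a b : Int × String × Int) : Bool :=
  decide (a.1 < b.1) ||
    (decide (a.1 = b.1) &&
      (decide (a.2.1 < b.2.1) || (decide (a.2.1 = b.2.1) && decide (a.2.2 < b.2.2))))

-- `_insort`: insert before the first entry with a larger key, else append
def sbInsert (e : (Int × String × Int) × List (String × String)) :
    List ((Int × String × Int) × List (String × String)) →
    List ((Int × String × Int) × List (String × String))
  | [] => [e]
  | h :: t => if sbKeyLt e.1 h.1 then e :: h :: t else h :: sbInsert e t

-- the body of B's `for bm in bookmarks` loop, state = (idx, top)
def sbStep (words : List String) (folder : Option String) (k : Int)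
    (st : Int × List ((Int × String × Int) × List (String × String)))
    (bm : List (String × String)) :
    Int × List ((Int × String × Int) × List (String × String)) :=
  let idx := st.1 + 1
  if sbSkip folder bm then (idx, st.2)
  else if !(sbMatches words bm) then (idx, st.2)
  else
    let key : Int × String × Int := (-(sbScore words bm), sbTitle bm, idx)
    if (st.2.length : Int) < k then (idx, sbInsert (key, bm) st.2)
    else
      match st.2.getLast? with
      | none => (idx, st.2)
      | some last => if sbKeyLt key last.1 then (idx, (sbInsert (key, bm) st.2).dropLast) else (idx, st.2)

def search_bookmarks_alt (bookmarks : List (List (String × String))) (query : String) (folder : Option String) (limit : Int) : List (List (String × String)) :=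
  let query_words := PySem.Str.split₀ (PySem.Str.lower query)
  let k := if 0 < limit then limit else 0
  ((bookmarks.foldl (sbStep query_words folder k) (0, [])).2).map (fun e => e.2)

-- ===== PRECONDITION & SPEC =====
-- Pre_ excludes negative limits (outside the natural top-k domain; A's slice then drops matches
-- from the end while B keeps none) and the inputs where A raises KeyError: a bookmark missing
-- "folder" while a non-empty folder filter is given, or one missing "title"/"url" that the
-- folder filter does not discard.
def Pre_search_bookmarks (bookmarks : List (List (String × String))) (query : String) (folder : Option String) (limit : Int) : Prop :=
  0 ≤ limit ∧ ∀ bm ∈ bookmarks,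
    (folder.getD "" ≠ "" → (PySem.Dict.mk bm).contains "folder" = true) ∧
    (sbSkip folder bm = false →
      (PySem.Dict.mk bm).contains "title" = true ∧ (PySem.Dict.mk bm).contains "url" = true)
instance (bookmarks : List (List (String × String))) (query : String) (folder : Option String) (limit : Int) : Decidable (Pre_search_bookmarks bookmarks query folder limit) := by unfold Pre_search_bookmarks; infer_instance

def pvWitness_search_bookmarks : (List (List (String × String))) × String × Option String × Int :=
  ([[("folder", "work"), ("title", "Lean proofs"), ("url", "https://lean.dev")]], "lean", some "work", 20)

def Spec_search_bookmarks (bookmarks : List (List (String × String))) (query : String) (folder : Option String) (limit : Int) (out : List (List (String × String))) : Prop := out = search_bookmarks_alt bookmarks query folder limit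
instance (bookmarks : List (List (String × String))) (query : String) (folder : Option String) (limit : Int) (out : List (List (String × String))) : Decidable (Spec_search_bookmarks bookmarks query folder limit out) := by unfold Spec_search_bookmarks; infer_instance

-- ===== CLAIM (what is proved, stated in full; the proofs are below) =====
def Claim_equal_search_bookmarks : Prop := ∀ (bookmarks : List (List (String × String))) (query : String) (folder : Option String) (limit : Int), Dom_search_bookmarks bookmarks query folder limit → Pre_search_bookmarks bookmarks query folder limit → Spec_search_bookmarks bookmarks query folder limit (search_bookmarks bookmarks query folder limit)

-- ===== LEMMAS AND PROOFS =====

-- A's keep-condition, fused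
def sbKeep (words : List String) (folder : Option String) (bm : List (String × String)) : Bool :=
  !sbSkip folder bm && sbMatches words bm

-- strip B's entry back to A's (score, bm) pair
def sbStripE (e : (Int × String × Int) × List (String × String)) : Int × List (String × String) :=
  (-e.1.1, e.2)

-- the comparison PySem.List.sorted2 uses for A's sort key
def sbBefore (a b : Int × List (String × String)) : Bool :=
  decide (-a.1 < -b.1) || (!decide (-b.1 < -a.1) && decide (sbTitle a.2 < sbTitle b.2))

-- B's step without the buffer bound (insert every kept bookmark)
def sbUStep (words : List String) (folder : Option String)
    (st : Int × List ((Int × String × Int) × List (String × String)))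
    (bm : List (String × String)) :
    Int × List ((Int × String × Int) × List (String × String)) :=
  if sbKeep words folder bm then
    (st.1 + 1, sbInsert ((-(sbScore words bm), sbTitle bm, st.1 + 1), bm) st.2)
  else (st.1 + 1, st.2)

theorem mem_sbInsert (e x : (Int × String × Int) × List (String × String))
    (l : List ((Int × String × Int) × List (String × String))) :
    x ∈ sbInsert e l ↔ x = e ∨ x ∈ l := by
  induction l with
  | nil => simp [sbInsert]
  | cons h t ih =>
    simp only [sbInsert]
    split
    · simp
    · simp [ih, or_left_comm]

theorem sbInsert_ne_nil (e : (Int × String × Int) × List (String × String))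
    (l : List ((Int × String × Int) × List (String × String))) : sbInsert e l ≠ [] := by
  cases l with
  | nil => simp [sbInsert]
  | cons h t => simp only [sbInsert]; split <;> simp

theorem sbKeyLt_iff (a b : Int × String × Int) :
    sbKeyLt a b = true ↔
      a.1 < b.1 ∨ (a.1 = b.1 ∧ (a.2.1 < b.2.1 ∨ (a.2.1 = b.2.1 ∧ a.2.2 < b.2.2))) := by
  simp [sbKeyLt]

theorem sbKeyLt_trans {a b c : Int × String × Int}
    (h1 : sbKeyLt a b = true) (h2 : sbKeyLt b c = true) : sbKeyLt a c = true := by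
  rw [sbKeyLt_iff] at *
  rcases h1 with h1 | ⟨e1, h1⟩ <;> rcases h2 with h2 | ⟨e2, h2⟩
  · exact Or.inl (h1.trans h2)
  · exact Or.inl (e2 ▸ h1)
  · exact Or.inl (e1 ▸ h2)
  · refine Or.inr ⟨e1.trans e2, ?_⟩
    rcases h1 with h1 | ⟨f1, h1⟩ <;> rcases h2 with h2 | ⟨f2, h2⟩
    · exact Or.inl (h1.trans h2)
    · exact Or.inl (f2 ▸ h1)
    · exact Or.inl (f1 ▸ h2)
    · exact Or.inr ⟨f1.trans f2, h1.trans h2⟩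

theorem sbKeyLt_total {a b : Int × String × Int} (hne : a.2.2 ≠ b.2.2)
    (h : sbKeyLt a b = false) : sbKeyLt b a = true := by
  have h' : ¬ (a.1 < b.1 ∨ (a.1 = b.1 ∧ (a.2.1 < b.2.1 ∨ (a.2.1 = b.2.1 ∧ a.2.2 < b.2.2)))) := by
    rw [← sbKeyLt_iff, h]; simp
  rw [sbKeyLt_iff]
  rcases lt_trichotomy a.1 b.1 with h1 | h1 | h1
  · exact absurd (Or.inl h1) h'
  · refine Or.inr ⟨h1.symm, ?_⟩
    rcases lt_trichotomy a.2.1 b.2.1 with h2 | h2 | h2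
    · exact absurd (Or.inr ⟨h1, Or.inl h2⟩) h'
    · rcases lt_trichotomy a.2.2 b.2.2 with h3 | h3 | h3
      · exact absurd (Or.inr ⟨h1, Or.inr ⟨h2, h3⟩⟩) h'
      · exact absurd h3 hne
      · exact Or.inr ⟨h2.symm, h3⟩
    · exact Or.inl h2
  · exact Or.inl h1

-- comparing a fresh key (largest index) against a stored one is A's pair comparison
theorem sbKeyLt_fresh (p p' : Int) (q q' : String) (i i' : Int) (hi : i' < i) :
    sbKeyLt (p, q, i) (p', q', i') =
      (decide (p < p') || (!decide (p' < p) && decide (q < q'))) := by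
  have hii : decide (i < i') = false := by simp; omega
  rw [Bool.eq_iff_iff]
  simp only [sbKeyLt, hii, Bool.and_false, Bool.or_false, Bool.or_eq_true, Bool.and_eq_true,
    Bool.not_eq_eq_eq_not, Bool.not_true, decide_eq_true_eq, decide_eq_false_iff_not]
  constructor
  · rintro (h | ⟨he, h⟩)
    · exact Or.inl h
    · exact Or.inr ⟨by omega, h⟩
  · rintro (h | ⟨hle, h⟩)
    · exact Or.inl h
    · by_cases hpp : p < p'
      · exact Or.inl hpp
      · exact Or.inr ⟨by omega, h⟩

theorem sbInsert_map_strip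
    (U : List ((Int × String × Int) × List (String × String)))
    (p : Int) (q : String) (i : Int) (bm : List (String × String))
    (hq : q = sbTitle bm)
    (hU : ∀ h ∈ U, h.1.2.2 < i ∧ h.1.2.1 = sbTitle h.2) :
    (sbInsert ((p, q, i), bm) U).map sbStripE =
      PySem.List.insertBy sbBefore (-p, bm) (U.map sbStripE) := by
  induction U with
  | nil => simp [sbInsert, PySem.List.insertBy, sbStripE]
  | cons h t ih =>
    obtain ⟨⟨hidx, httl⟩, hU'⟩ : (h.1.2.2 < i ∧ h.1.2.1 = sbTitle h.2) ∧
        ∀ x ∈ t, x.1.2.2 < i ∧ x.1.2.1 = sbTitle x.2 :=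
      ⟨hU h (by simp), fun x hx => hU x (by simp [hx])⟩
    have hcmp : sbKeyLt (p, q, i) h.1 = sbBefore (-p, bm) (sbStripE h) := by
      obtain ⟨⟨p', q', i'⟩, bm'⟩ := h
      simp only at hidx httl
      rw [sbKeyLt_fresh p p' q q' i i' hidx]
      simp [sbBefore, sbStripE, hq, ← httl]
    cases hc : sbKeyLt (p, q, i) h.1 with
    | true =>
      rw [hc] at hcmp
      simp only [sbInsert, hc, if_true, List.map_cons, PySem.List.insertBy, ← hcmp]
      simp [sbStripE]
    | false =>
      simp only [sbInsert, hc, Bool.false_eq_true, if_false, List.map_cons, PySem.List.insertBy]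
      rw [hc] at hcmp
      rw [← hcmp]
      simp only [Bool.false_eq_true, if_false]
      rw [ih hU']

-- invariant of the unbounded fold: it computes A's insertion sort of A's scored matches
theorem sbUFold_spec (words : List String) (folder : Option String)
    (bs : List (List (String × String))) (i : Int)
    (U : List ((Int × String × Int) × List (String × String)))
    (hU : ∀ h ∈ U, h.1.2.2 ≤ i ∧ h.1.2.1 = sbTitle h.2) :
    (∀ h ∈ (bs.foldl (sbUStep words folder) (i, U)).2,
        h.1.2.2 ≤ (bs.foldl (sbUStep words folder) (i, U)).1 ∧ h.1.2.1 = sbTitle h.2) ∧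
    (bs.foldl (sbUStep words folder) (i, U)).2.map sbStripE =
      List.foldl (fun acc x => PySem.List.insertBy sbBefore x acc) (U.map sbStripE)
        ((bs.filter (sbKeep words folder)).map (fun bm => (sbScore words bm, bm))) := by
  induction bs generalizing i U with
  | nil => exact ⟨hU, rfl⟩
  | cons b bs ih =>
    cases hb : sbKeep words folder b with
    | false =>
      simp only [List.foldl_cons, List.filter_cons, hb, sbUStep, Bool.false_eq_true, if_false]
      exact ih (i + 1) U (fun h hh => ⟨(hU h hh).1.trans (by omega), (hU h hh).2⟩)
    | true =>
      simp only [List.foldl_cons, List.filter_cons, hb, sbUStep, if_true, List.map_cons]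
      have hU' : ∀ h ∈ sbInsert ((-(sbScore words b), sbTitle b, i + 1), b) U,
          h.1.2.2 ≤ i + 1 ∧ h.1.2.1 = sbTitle h.2 := by
        intro h hh
        rcases (mem_sbInsert _ h U).mp hh with rfl | hh
        · exact ⟨le_refl _, rfl⟩
        · exact ⟨(hU h hh).1.trans (by omega), (hU h hh).2⟩
      obtain ⟨h1, h2⟩ := ih (i + 1) _ hU'
      refine ⟨h1, ?_⟩
      rw [h2, sbInsert_map_strip U (-(sbScore words b)) (sbTitle b) (i + 1) b rfl
        (fun h hh => ⟨lt_of_le_of_lt (hU h hh).1 (by omega), (hU h hh).2⟩)]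
      simp

theorem sbInsert_pairwise (e : (Int × String × Int) × List (String × String))
    (U : List ((Int × String × Int) × List (String × String)))
    (hs : U.Pairwise (fun a b => sbKeyLt a.1 b.1 = true))
    (htot : ∀ h ∈ U, sbKeyLt e.1 h.1 = false → sbKeyLt h.1 e.1 = true) :
    (sbInsert e U).Pairwise (fun a b => sbKeyLt a.1 b.1 = true) := by
  induction U with
  | nil => simp [sbInsert]
  | cons u us ih =>
    rw [List.pairwise_cons] at hs
    cases hc : sbKeyLt e.1 u.1 with
    | true =>
      simp only [sbInsert, hc, if_true]
      refine List.pairwise_cons.mpr ⟨?_, List.pairwise_cons.mpr hs⟩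
      intro x hx
      rcases List.mem_cons.mp hx with heq | hx'
      · rw [heq]; exact hc
      · exact sbKeyLt_trans hc (hs.1 x hx')
    | false =>
      simp only [sbInsert, hc, Bool.false_eq_true, if_false]
      refine List.pairwise_cons.mpr ⟨?_, ih hs.2 (fun h hh hf => htot h (by simp [hh]) hf)⟩
      intro x hx
      rcases (mem_sbInsert e x us).mp hx with heq | hx'
      · rw [heq]; exact htot u (by simp) hc
      · exact hs.1 x hx' 

theorem length_sbInsert (e : (Int × String × Int) × List (String × String))
    (l : List ((Int × String × Int) × List (String × String))) :
    (sbInsert e l).length = l.length + 1 := by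
  induction l with
  | nil => simp [sbInsert]
  | cons h t ih => simp only [sbInsert]; split <;> simp [ih]

theorem dropLast_take' {α : Type} (n : Nat) (l : List α) (h : n ≤ l.length) :
    (l.take n).dropLast = l.take (n - 1) := by
  rw [List.dropLast_eq_take, List.length_take, List.take_take]
  congr 1
  omega

theorem getLast?_cons_ne_nil {α : Type} (x : α) (l : List α) (h : l ≠ []) :
    (x :: l).getLast? = l.getLast? := by
  cases l with
  | nil => simp at h
  | cons a t => exact List.getLast?_cons_cons

theorem sbInsert_take_lt (k : Nat) (e last : (Int × String × Int) × List (String × String))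
    (U : List ((Int × String × Int) × List (String × String)))
    (hk : k ≤ U.length) (hlast : (U.take k).getLast? = some last)
    (hlt : sbKeyLt e.1 last.1 = true) :
    (sbInsert e U).take k = (sbInsert e (U.take k)).dropLast := by
  induction U generalizing k with
  | nil =>
    have : k = 0 := by simpa using hk
    subst this; simp at hlast
  | cons u us ih =>
    cases k with
    | zero => simp at hlast
    | succ m =>
      cases m with
      | zero =>
        simp only [List.take_succ_cons, List.take_zero, List.getLast?_singleton,
          Option.some.injEq] at hlast
        subst hlast
        simp only [sbInsert, hlt, if_true, List.take_succ_cons, List.take_zero]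
        rfl
      | succ m' =>
        have hus : m' + 1 ≤ us.length := by simpa using hk
        have hne : us.take (m' + 1) ≠ [] := by
          cases us with
          | nil => simp at hus
          | cons w ws => simp [List.take_succ_cons]
        have hlast' : (us.take (m' + 1)).getLast? = some last := by
          rw [List.take_succ_cons] at hlast
          rwa [getLast?_cons_ne_nil _ _ hne] at hlast
        cases hc : sbKeyLt e.1 u.1 with
        | true =>
          simp only [sbInsert, hc, if_true, List.take_succ_cons]
          rw [List.dropLast_cons_of_ne_nil (by simp), List.dropLast_cons_of_ne_nil hne,
            dropLast_take' (m' + 1) us hus]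
          simp
        | false =>
          simp only [sbInsert, hc, Bool.false_eq_true, if_false, List.take_succ_cons]
          rw [ih (m' + 1) hus hlast',
            List.dropLast_cons_of_ne_nil (sbInsert_ne_nil e (us.take (m' + 1)))]

theorem sbInsert_take_ge (k : Nat) (e last : (Int × String × Int) × List (String × String))
    (U : List ((Int × String × Int) × List (String × String)))
    (hs : U.Pairwise (fun a b => sbKeyLt a.1 b.1 = true))
    (hk : k ≤ U.length) (hlast : (U.take k).getLast? = some last)
    (hlt : sbKeyLt e.1 last.1 = false) :
    (sbInsert e U).take k = U.take k := by
  induction U generalizing k with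
  | nil =>
    have : k = 0 := by simpa using hk
    subst this; simp at hlast
  | cons u us ih =>
    rw [List.pairwise_cons] at hs
    cases k with
    | zero => simp at hlast
    | succ m =>
      cases m with
      | zero =>
        simp only [List.take_succ_cons, List.take_zero, List.getLast?_singleton,
          Option.some.injEq] at hlast
        subst hlast
        simp [sbInsert, hlt]
      | succ m' =>
        have hus : m' + 1 ≤ us.length := by simpa using hk
        have hne : us.take (m' + 1) ≠ [] := by
          cases us with
          | nil => simp at hus
          | cons w ws => simp [List.take_succ_cons]
        have hlast' : (us.take (m' + 1)).getLast? = some last := by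
          rw [List.take_succ_cons] at hlast
          rwa [getLast?_cons_ne_nil _ _ hne] at hlast
        have hmem : last ∈ us := List.mem_of_mem_take (List.mem_of_getLast? hlast')
        have hc : sbKeyLt e.1 u.1 = false := by
          cases hc : sbKeyLt e.1 u.1 with
          | false => rfl
          | true =>
            have := sbKeyLt_trans hc (hs.1 last hmem)
            rw [this] at hlt; exact absurd hlt (by simp)
        simp only [sbInsert, hc, Bool.false_eq_true, if_false, List.take_succ_cons]
        rw [ih (m' + 1) hs.2 hus hlast']

-- invariant of the bounded fold: its buffer is `take k` of the unbounded fold's list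
theorem sbBFold_spec (words : List String) (folder : Option String) (k : Int) (hk0 : 0 ≤ k)
    (bs : List (List (String × String))) (i : Int)
    (U : List ((Int × String × Int) × List (String × String)))
    (hs : U.Pairwise (fun a b => sbKeyLt a.1 b.1 = true))
    (hidx : ∀ h ∈ U, h.1.2.2 ≤ i) :
    bs.foldl (sbStep words folder k) (i, U.take k.toNat) =
      ((bs.foldl (sbUStep words folder) (i, U)).1,
       (bs.foldl (sbUStep words folder) (i, U)).2.take k.toNat) := by
  induction bs generalizing i U with
  | nil => rfl
  | cons b bs ih =>
    simp only [List.foldl_cons]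
    cases hb : sbKeep words folder b with
    | false =>
      have hstep : sbStep words folder k (i, U.take k.toNat) b = (i + 1, U.take k.toNat) := by
        unfold sbKeep at hb
        cases hsk : sbSkip folder b with
        | true => simp [sbStep, hsk]
        | false =>
          rw [hsk] at hb; simp only [Bool.not_false, Bool.true_and] at hb
          simp [sbStep, hsk, hb]
      have hustep : sbUStep words folder (i, U) b = (i + 1, U) := by
        simp [sbUStep, hb]
      rw [hstep, hustep]
      exact ih (i + 1) U hs (fun h hh => (hidx h hh).trans (by omega))
    | true =>
      unfold sbKeep at hb
      rw [Bool.and_eq_true, Bool.not_eq_eq_eq_not, Bool.not_true] at hb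
      have hustep : sbUStep words folder (i, U) b =
          (i + 1, sbInsert ((-(sbScore words b), sbTitle b, i + 1), b) U) := by
        simp [sbUStep, sbKeep, hb.1, hb.2]
      set e : (Int × String × Int) × List (String × String) :=
        ((-(sbScore words b), sbTitle b, i + 1), b) with he
      have hTlen : (U.take k.toNat).length = min k.toNat U.length := List.length_take
      have hstep : sbStep words folder k (i, U.take k.toNat) b =
          (i + 1, (sbInsert e U).take k.toNat) := by
        by_cases hlen : ((U.take k.toNat).length : Int) < k
        · have hUlen : U.length < k.toNat := by omega
          have hTU : U.take k.toNat = U := List.take_of_length_le (by omega)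
          have hIns : (sbInsert e U).take k.toNat = sbInsert e U :=
            List.take_of_length_le (by rw [length_sbInsert]; omega)
          rw [hTU] at hlen
          simp [sbStep, hb.1, hb.2, hTU, hlen, hIns]
          rfl
        · have hT : (U.take k.toNat).length = k.toNat ∧ k.toNat ≤ U.length := by omega
          cases hgl : (U.take k.toNat).getLast? with
          | none =>
            have hTnil : U.take k.toNat = [] := List.getLast?_eq_none_iff.mp hgl
            have hkeq : k = 0 := by
              rw [hTnil] at hlen; simp at hlen; omega
            subst hkeq
            rw [hTnil]
            simp [sbStep, hb.1, hb.2]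
          | some last =>
            cases hc : sbKeyLt e.1 last.1 with
            | true =>
              have hins := sbInsert_take_lt k.toNat e last U hT.2 hgl hc
              have hc' : sbKeyLt (-sbScore words b, sbTitle b, i + 1) last.1 = true := hc
              simp only [sbStep, hb.1, Bool.false_eq_true, if_false, hb.2, Bool.not_true, hlen,
                if_false, hgl, ← he, hc', if_true, hins]
            | false =>
              have hins := sbInsert_take_ge k.toNat e last U hs hT.2 hgl hc
              have hc' : sbKeyLt (-sbScore words b, sbTitle b, i + 1) last.1 = false := hc
              simp only [sbStep, hb.1, Bool.false_eq_true, if_false, hb.2, Bool.not_true, hlen,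
                if_false, hgl, ← he, hc', Bool.false_eq_true, if_false, hins]
      rw [hstep, hustep]
      have hs' : (sbInsert e U).Pairwise (fun a b => sbKeyLt a.1 b.1 = true) := by
        refine sbInsert_pairwise e U hs ?_
        intro h hh hf
        refine sbKeyLt_total ?_ hf
        have := hidx h hh
        simp only [he]
        omega
      have hidx' : ∀ h ∈ sbInsert e U, h.1.2.2 ≤ i + 1 := by
        intro h hh
        rcases (mem_sbInsert e h U).mp hh with heq | hh'
        · rw [heq]
        · exact (hidx h hh').trans (by omega)
      exact ih (i + 1) (sbInsert e U) hs' hidx'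

-- ===== VERDICT (by name: the statement is the Claim_ definition above) =====
theorem search_bookmarks_spec : Claim_equal_search_bookmarks := by
  intro bookmarks query folder limit _hDom hPre
  obtain ⟨hlim, -⟩ := hPre
  unfold Spec_search_bookmarks
  set words := PySem.Str.split₀ (PySem.Str.lower query) with hw
  have hkeq : (if 0 < limit then limit else 0) = limit := by split <;> omega
  obtain ⟨-, hmap⟩ := sbUFold_spec words folder bookmarks 0 [] (by simp)
  simp only [List.map_nil] at hmap
  have hB : search_bookmarks_alt bookmarks query folder limit =
      ((bookmarks.foldl (sbUStep words folder) (0, [])).2.take limit.toNat).map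
        (fun e => e.2) := by
    simp only [search_bookmarks_alt]
    rw [← hw, hkeq]
    rw [show ([] : List ((Int × String × Int) × List (String × String))) =
        ([] : List ((Int × String × Int) × List (String × String))).take limit.toNat from
        List.take_nil.symm]
    rw [sbBFold_spec words folder limit hlim bookmarks 0 [] (by simp) (by simp)]
    simp
  have hstepA : (fun (acc : List (Int × List (String × String))) bm =>
      if sbSkip folder bm then acc
      else if !(sbMatches words bm) then acc
      else acc ++ [(sbScore words bm, bm)]) =
      (fun acc bm => if sbKeep words folder bm then acc ++ [(sbScore words bm, bm)] else acc) := by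
    funext acc bm
    unfold sbKeep
    cases h1 : sbSkip folder bm <;> cases h2 : sbMatches words bm <;> simp
  have hsorted : PySem.List.sorted2
      ((bookmarks.filter (sbKeep words folder)).map (fun bm => (sbScore words bm, bm)))
      (fun x => -x.1) (fun x => sbTitle x.2) =
      ((bookmarks.filter (sbKeep words folder)).map (fun bm => (sbScore words bm, bm))).foldl
        (fun acc x => PySem.List.insertBy sbBefore x acc) [] := rfl
  have hA : search_bookmarks bookmarks query folder limit =
      (((bookmarks.foldl (sbUStep words folder) (0, [])).2.map sbStripE).take limit.toNat).map
        (fun x => x.2) := by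
    simp only [search_bookmarks]
    rw [← hw, hstepA,
      PySem.List.foldl_append_if (sbKeep words folder) (fun bm => (sbScore words bm, bm))
        bookmarks [], List.nil_append, hsorted, ← hmap, PySem.List.slice_to _ hlim]
  rw [hA, hB]
  simp [List.map_take, List.map_map, Function.comp_def, sbStripE]
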